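-- pv_equiv track=rewrite | github.com/tre1322/publisher-demo-rag | src/modules/extraction/text_normalizer.py | _collapse_newlines
-- ===== SOURCE A (Python) =====
-- def _collapse_newlines(text: str) -> str:
--     """Collapse column-wrap newlines to spaces, preserve real paragraph breaks.
--
--     The input text uses \n\n to separate blocks (structural boundaries from the
--     cell-claiming phase) and single \n for column line-wraps within a block.
--
--     Strategy:
--     1. Split on \n\n to get structural blocks (these are real paragraph candidates)
--     2. Within each block, collapse single \n to spaces (column line-wraps)
--     3. Rejoin blocks with \n\n to preserve paragraph structure
--     """
--     # Split on double-newline to get structural blocks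
--     blocks = text.split("\n\n")
--     cleaned_blocks = []
--
--     for block in blocks:
--         block = block.strip()
--         if not block:
--             continue
--         # Within a block, single newlines are column line-wraps → collapse to space
--         lines = block.split("\n")
--         merged = " ".join(line.strip() for line in lines if line.strip())
--         if merged:
--             cleaned_blocks.append(merged)
--
--     return "\n\n".join(cleaned_blocks)
-- ===== SOURCE B (Python) =====
-- def _merge(lines):
--     """Join the stripped non-empty lines of one paragraph with single spaces."""
--     return " ".join(s for s in (l.strip() for l in lines) if s)
--
--
-- def _collapse_newlines(text: str) -> str:
--     """One pass over text.split('\n'): an exactly-empty line is a paragraph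
--     boundary (it is where a '\n\n' occurs); other lines accumulate into the
--     current paragraph, which is merged with spaces when flushed."""
--     results = []
--     cur = []
--     for line in text.split("\n"):
--         if line == "":
--             merged = _merge(cur)
--             if merged:
--                 results.append(merged)
--             cur = []
--         else:
--             cur.append(line)
--     merged = _merge(cur)
--     if merged:
--         results.append(merged)
--     return "\n\n".join(results)
-- ===== Notes on version B (the rewrite author's own statement) =====
-- stated objective: alternative
-- what changed: Replaces the nested split('\n\n')-then-strip-then-split('\n') passes by a single pass over text.split('\n') that accumulates the current paragraph and flushes it at each exactly-empty line.
import Mathlib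
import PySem

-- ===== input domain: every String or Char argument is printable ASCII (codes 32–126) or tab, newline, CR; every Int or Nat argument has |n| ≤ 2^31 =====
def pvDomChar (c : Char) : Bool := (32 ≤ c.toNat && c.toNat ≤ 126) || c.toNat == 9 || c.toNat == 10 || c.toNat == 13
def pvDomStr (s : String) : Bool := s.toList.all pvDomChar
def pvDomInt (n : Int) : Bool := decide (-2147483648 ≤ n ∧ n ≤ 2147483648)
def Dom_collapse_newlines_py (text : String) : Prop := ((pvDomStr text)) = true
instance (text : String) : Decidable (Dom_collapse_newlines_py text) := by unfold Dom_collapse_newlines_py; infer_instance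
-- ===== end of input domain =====

-- B replaces A's nested split("\n\n")/strip/split("\n") passes by a single pass over
-- text.split("\n") with an explicit current-paragraph accumulator (objective: alternative).

-- ===== PORT A =====
-- literal transliteration of _collapse_newlines (Source A): split on "\n\n", per block
-- strip, split on "\n", join stripped non-empty lines with " ", rejoin with "\n\n"
def collapse_newlines_py (text : String) : String :=
  let blocks := PySem.Chars.splitOn text.toList ['\n', '\n']
  let cleaned_blocks := blocks.foldl (fun acc block =>
    let b := PySem.Chars.strip block
    if b = [] then acc
    else
      let lines := PySem.Chars.splitOn b ['\n']
      let merged := PySem.Chars.join [' ']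
        ((lines.filter (fun line => PySem.Chars.strip line ≠ [])).map PySem.Chars.strip)
      if merged = [] then acc else acc ++ [merged]) []
  String.ofList (PySem.Chars.join ['\n', '\n'] cleaned_blocks)

-- ===== PORT B =====
-- literal transliteration of Source B: _merge helper …
def pvMergeAlt (lines : List (List Char)) : List Char :=
  PySem.Chars.join [' '] ((lines.map PySem.Chars.strip).filter (fun s => s ≠ []))

-- … and the single pass over text.split("\n") with state (cur, results)
def collapse_newlines_py_alt (text : String) : String :=
  let st := (PySem.Chars.splitOn text.toList ['\n']).foldl
    (fun (st : List (List Char) × List (List Char)) (line : List Char) =>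
      if line = [] then
        let merged := pvMergeAlt st.1
        ([], if merged = [] then st.2 else st.2 ++ [merged])
      else (st.1 ++ [line], st.2)) ([], [])
  let merged := pvMergeAlt st.1
  String.ofList (PySem.Chars.join ['\n', '\n'] (if merged = [] then st.2 else st.2 ++ [merged]))

-- ===== PRECONDITION & SPEC =====
def Spec_collapse_newlines_py (text : String) (out : String) : Prop := out = collapse_newlines_py_alt text
instance (text : String) (out : String) : Decidable (Spec_collapse_newlines_py text out) := by unfold Spec_collapse_newlines_py; infer_instance

-- ===== CLAIM (what is proved, stated in full; the proofs are below) =====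
def Claim_equal_collapse_newlines_py : Prop := ∀ (text : String), Dom_collapse_newlines_py text → Spec_collapse_newlines_py text (collapse_newlines_py text)

-- ===== LEMMAS AND PROOFS =====

-- proof-side helpers: structural versions of split("\n"), split("\n\n"),
-- grouping of lines at empty lines, and the per-paragraph merge
def cons1 (c : Char) (bs : List (List Char)) : List (List Char) :=
  match bs with | [] => [[c]] | b :: t => (c :: b) :: t

def withHead (x : List Char) (bs : List (List Char)) : List (List Char) :=
  match bs with | [] => [x] | b :: t => (x ++ b) :: t

def withHeadG (X : List (List Char)) (gs : List (List (List Char))) : List (List (List Char)) :=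
  match gs with | [] => [X] | g :: t => (X ++ g) :: t

def linesOf : List Char → List (List Char)
  | [] => [[]]
  | '\n' :: r => [] :: linesOf r
  | c :: r => cons1 c (linesOf r)

def blocksOf : List Char → List (List Char)
  | '\n' :: '\n' :: r => [] :: blocksOf r
  | c :: r => cons1 c (blocksOf r)
  | [] => [[]]

def groupsOf : List (List Char) → List (List (List Char))
  | [] => [[]]
  | l :: r => if l = [] then [] :: groupsOf r else withHeadG [l] (groupsOf r)

def para (g : List (List Char)) : List Char :=
  PySem.Chars.join [' '] ((g.map PySem.Chars.strip).filter (fun s => s ≠ []))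

def ical : List (List Char) → List Char
  | [] => []
  | [x] => x
  | x :: q => x ++ '\n' :: ical q

def lastMod (f : List Char → List Char) : List (List Char) → List (List Char)
  | [] => []
  | [l] => [f l]
  | l :: t => l :: lastMod f t

-- A-side filtered paragraph list / B-side filtered paragraph list
def FA (bs : List (List Char)) : List (List Char) :=
  (bs.map (fun b => para (linesOf b))).filter (fun s => s ≠ [])

def FB (gs : List (List (List Char))) : List (List Char) :=
  (gs.map para).filter (fun s => s ≠ [])

theorem linesOf_ne_nil (l : List Char) : linesOf l ≠ [] := by
  unfold linesOf; split; · simp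
  · simp
  · simp [cons1]; split; simp; simp

theorem blocksOf_ne_nil (l : List Char) : blocksOf l ≠ [] := by
  unfold blocksOf; split; · simp
  · simp [cons1]; split; simp; simp
  · simp

theorem groupsOf_ne_nil (L : List (List Char)) : groupsOf L ≠ [] := by
  unfold groupsOf; split; · simp
  · split; · simp
    · simp [withHeadG]; split; simp; simp

theorem linesOf_cons (c : Char) (r : List Char) (h : c ≠ '\n') :
    linesOf (c :: r) = cons1 c (linesOf r) := by
  rw [linesOf.eq_def]; split
  all_goals simp_all

theorem blocksOf_nn (r : List Char) : blocksOf ('\n' :: '\n' :: r) = [] :: blocksOf r := rfl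

theorem blocksOf_cons (c : Char) (r : List Char) (h : c ≠ '\n') :
    blocksOf (c :: r) = cons1 c (blocksOf r) := by
  rw [blocksOf.eq_def]; split
  all_goals simp_all

theorem blocksOf_nl_single : blocksOf ['\n'] = [['\n']] := rfl

theorem blocksOf_nl_cons (c : Char) (r : List Char) (h : c ≠ '\n') :
    blocksOf ('\n' :: c :: r) = cons1 '\n' (blocksOf (c :: r)) := by
  rw [blocksOf.eq_def]; split
  · simp_all
  · rename_i heq; injection heq with h1 h2
    subst h2; rw [← h1]
  · simp_all

theorem withHead_nil (bs : List (List Char)) (h : bs ≠ []) : withHead [] bs = bs := by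
  cases bs with | nil => simp_all | cons b t => simp [withHead]

theorem withHeadG_nil (gs : List (List (List Char))) (h : gs ≠ []) : withHeadG [] gs = gs := by
  cases gs with | nil => simp_all | cons g t => simp [withHeadG]

theorem withHeadG_withHeadG (X Y : List (List Char)) (gs : List (List (List Char))) :
    withHeadG X (withHeadG Y gs) = withHeadG (X ++ Y) gs := by
  cases gs with | nil => simp [withHeadG] | cons g t => simp [withHeadG]

theorem cons1_eq_withHead (c : Char) (bs : List (List Char)) : cons1 c bs = withHead [c] bs := by
  cases bs with | nil => simp [cons1, withHead] | cons b t => simp [cons1, withHead]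

theorem go_lines : ∀ (fuel : Nat) (l cur : List Char) (acc : List (List Char)),
    l.length ≤ fuel →
    PySem.Chars.splitOn.go ['\n'] fuel l cur acc = acc.reverse ++ withHead cur.reverse (linesOf l) := by
  intro fuel
  induction fuel with
  | zero =>
    intro l cur acc h
    have : l = [] := by simpa using h
    subst this
    simp [PySem.Chars.splitOn.go, withHead, linesOf]
  | succ n ih =>
    intro l cur acc h
    cases l with
    | nil => simp [PySem.Chars.splitOn.go, withHead, linesOf]
    | cons c rest =>
      by_cases hc : c = '\n'
      · subst hc
        rw [PySem.Chars.splitOn.go]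
        simp only [List.length] at h
        rw [show List.isPrefixOf ['\n'] ('\n' :: rest) = true by simp [List.isPrefixOf]]
        simp only [if_true]
        rw [show List.drop (['\n'] : List Char).length ('\n' :: rest) = rest from rfl]
        rw [ih rest [] _ (by omega)]
        simp only [List.reverse_cons, List.reverse_nil]
        rw [withHead_nil _ (linesOf_ne_nil rest)]
        show acc.reverse ++ [cur.reverse] ++ linesOf rest = acc.reverse ++ withHead cur.reverse ([] :: linesOf rest)
        simp [withHead]
      · rw [PySem.Chars.splitOn.go]
        have hpre : List.isPrefixOf ['\n'] (c :: rest) = false := by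
          simp [List.isPrefixOf]; exact fun h => absurd h.symm hc
        rw [hpre]
        simp only [Bool.false_eq_true, if_false]
        rw [ih rest (c :: cur) acc (by simp at h; omega)]
        rw [linesOf_cons c rest hc]
        cases hl : linesOf rest with
        | nil => exact absurd hl (linesOf_ne_nil rest)
        | cons l0 ls => simp [cons1, withHead]

theorem go_blocks : ∀ (fuel : Nat) (l cur : List Char) (acc : List (List Char)),
    l.length ≤ fuel →
    PySem.Chars.splitOn.go ['\n', '\n'] fuel l cur acc = acc.reverse ++ withHead cur.reverse (blocksOf l) := by
  intro fuel
  induction fuel with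
  | zero =>
    intro l cur acc h
    have : l = [] := by simpa using h
    subst this
    simp [PySem.Chars.splitOn.go, withHead, blocksOf]
  | succ n ih =>
    intro l cur acc h
    cases l with
    | nil => simp [PySem.Chars.splitOn.go, withHead, blocksOf]
    | cons c rest =>
      by_cases hnn : c = '\n' ∧ ∃ r2, rest = '\n' :: r2
      · obtain ⟨hc, r2, hr⟩ := hnn
        subst hc; subst hr
        rw [PySem.Chars.splitOn.go]
        simp only [List.length] at h
        rw [show List.isPrefixOf ['\n', '\n'] ('\n' :: '\n' :: r2) = true by simp [List.isPrefixOf]]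
        simp only [if_true]
        rw [ih (List.drop (['\n', '\n'] : List Char).length ('\n' :: '\n' :: r2)) [] _ (by simp at h ⊢; omega)]
        simp only [List.length_cons, List.length_nil, List.drop_succ_cons, List.drop_zero,
          List.reverse_cons, List.reverse_nil]
        rw [withHead_nil _ (blocksOf_ne_nil r2), blocksOf_nn]
        simp [withHead]
      · rw [PySem.Chars.splitOn.go]
        have hpre : List.isPrefixOf ['\n', '\n'] (c :: rest) = false := by
          cases rest with
          | nil => simp [List.isPrefixOf]
          | cons d r2 =>
            simp [List.isPrefixOf]
            intro hc hd
            exact hnn ⟨hc.symm, r2, by rw [hd]⟩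
        rw [hpre]
        simp only [Bool.false_eq_true, if_false]
        rw [ih rest (c :: cur) acc (by simp at h; omega)]
        have hb : blocksOf (c :: rest) = cons1 c (blocksOf rest) := by
          by_cases hc : c = '\n'
          · subst hc
            cases rest with
            | nil => rw [blocksOf_nl_single]; rfl
            | cons d r2 =>
              have hd : d ≠ '\n' := by
                intro hd; exact hnn ⟨rfl, r2, by rw [hd]⟩
              exact blocksOf_nl_cons d r2 hd
          · exact blocksOf_cons c rest hc
        rw [hb]
        cases hl : blocksOf rest with
        | nil => exact absurd hl (blocksOf_ne_nil rest)
        | cons b0 bs => simp [cons1, withHead]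

theorem splitOn_eq_linesOf (l : List Char) : PySem.Chars.splitOn l ['\n'] = linesOf l := by
  unfold PySem.Chars.splitOn
  rw [go_lines _ l [] [] (by omega)]
  simp [withHead_nil _ (linesOf_ne_nil l)]

theorem splitOn_eq_blocksOf (l : List Char) : PySem.Chars.splitOn l ['\n', '\n'] = blocksOf l := by
  unfold PySem.Chars.splitOn
  rw [go_blocks _ l [] [] (by omega)]
  simp [withHead_nil _ (blocksOf_ne_nil l)]

theorem linesOf_append_nl (x y : List Char) : linesOf (x ++ '\n' :: y) = linesOf x ++ linesOf y := by
  induction x with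
  | nil => simp [linesOf]
  | cons c x ih =>
    by_cases hc : c = '\n'
    · subst hc
      show linesOf ('\n' :: (x ++ '\n' :: y)) = linesOf ('\n' :: x) ++ linesOf y
      rw [show linesOf ('\n' :: (x ++ '\n' :: y)) = [] :: linesOf (x ++ '\n' :: y) from rfl]
      rw [show linesOf ('\n' :: x) = [] :: linesOf x from rfl]
      rw [ih]; rfl
    · rw [List.cons_append, linesOf_cons c _ hc, linesOf_cons c _ hc, ih]
      cases hl : linesOf x with
      | nil => exact absurd hl (linesOf_ne_nil x)
      | cons l0 ls => simp [cons1]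

theorem linesOf_nlfree (x : List Char) (h : '\n' ∉ x) : linesOf x = [x] := by
  induction x with
  | nil => rfl
  | cons c x ih =>
    have hc : c ≠ '\n' := fun hc => h (by simp [hc])
    rw [linesOf_cons c x hc, ih (fun hx => h (by simp [hx]))]
    rfl

theorem ical_cons (x : List Char) (q : List (List Char)) (h : q ≠ []) :
    ical (x :: q) = x ++ '\n' :: ical q := by
  cases q with | nil => simp_all | cons y t => rfl

theorem ical_snoc (q : List (List Char)) (y : List Char) (h : q ≠ []) :
    ical (q ++ [y]) = ical q ++ '\n' :: y := by
  induction q with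
  | nil => simp_all
  | cons x t ih =>
    cases t with
    | nil => rfl
    | cons z t2 =>
      rw [List.cons_append, ical_cons x _ (by simp), ical_cons x _ (by simp), ih (by simp)]
      simp

theorem ical_snoc_char (P : List (List Char)) (pre : List Char) (c : Char) :
    ical (P ++ [pre]) ++ [c] = ical (P ++ [pre ++ [c]]) := by
  cases P with
  | nil => rfl
  | cons p t =>
    rw [ical_snoc (p :: t) pre (by simp), ical_snoc (p :: t) (pre ++ [c]) (by simp)]
    simp

theorem linesOf_ical (Q : List (List Char)) (hne : Q ≠ []) (h : ∀ l ∈ Q, '\n' ∉ l) :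
    linesOf (ical Q) = Q := by
  induction Q with
  | nil => simp_all
  | cons x t ih =>
    cases t with
    | nil => exact linesOf_nlfree x (h x (by simp))
    | cons z t2 =>
      rw [ical_cons x _ (by simp), linesOf_append_nl, linesOf_nlfree x (h x (by simp)),
        ih (by simp) (fun l hl => h l (List.mem_cons_of_mem x hl))]
      rfl

theorem strip_nil : PySem.Chars.strip [] = [] := rfl

theorem para_nil : para [] = [] := rfl

theorem para_cons_nil (g : List (List Char)) : para ([] :: g) = para g := by
  simp [para, strip_nil]

theorem para_append_nil (g : List (List Char)) : para (g ++ [[]]) = para g := by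
  simp [para, strip_nil]

theorem strip_cons_space (c : Char) (l : List Char) (h : PySem.Chars.isspace c = true) :
    PySem.Chars.strip (c :: l) = PySem.Chars.strip l := by
  simp [PySem.Chars.strip, PySem.Chars.lstrip, h]

theorem rstrip_snoc_space (c : Char) (l : List Char) (h : PySem.Chars.isspace c = true) :
    PySem.Chars.rstrip (l ++ [c]) = PySem.Chars.rstrip l := by
  simp [PySem.Chars.rstrip, h]

theorem strip_snoc_space (c : Char) (l : List Char) (h : PySem.Chars.isspace c = true) :
    PySem.Chars.strip (l ++ [c]) = PySem.Chars.strip l := by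
  unfold PySem.Chars.strip PySem.Chars.lstrip
  rw [List.dropWhile_append]
  by_cases he : (List.dropWhile PySem.Chars.isspace l).isEmpty
  · rw [if_pos he]
    simp only [List.isEmpty_iff] at he
    rw [he, show List.dropWhile PySem.Chars.isspace [c] = [] by simp [List.dropWhile, h]]
  · rw [if_neg he]
    exact rstrip_snoc_space c _ h

theorem rstrip_snoc_nospace (c : Char) (l : List Char) (h : PySem.Chars.isspace c = false) :
    PySem.Chars.rstrip (l ++ [c]) = l ++ [c] := by
  simp [PySem.Chars.rstrip, h]

theorem lastMod_cons (f : List Char → List Char) (l : List Char) (t : List (List Char)) (h : t ≠ []) :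
    lastMod f (l :: t) = l :: lastMod f t := by
  cases t with | nil => simp_all | cons z t2 => rfl

theorem linesOf_snoc_char (c : Char) (x : List Char) (h : c ≠ '\n') :
    linesOf (x ++ [c]) = lastMod (fun l => l ++ [c]) (linesOf x) := by
  induction x with
  | nil =>
    rw [List.nil_append, linesOf_cons c [] h]
    rfl
  | cons d x ih =>
    by_cases hd : d = '\n'
    · subst hd
      rw [show ('\n' :: x) ++ [c] = '\n' :: (x ++ [c]) from rfl]
      rw [show linesOf ('\n' :: (x ++ [c])) = [] :: linesOf (x ++ [c]) from rfl]
      rw [show linesOf ('\n' :: x) = [] :: linesOf x from rfl]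
      rw [lastMod_cons _ _ _ (linesOf_ne_nil x), ih]
    · rw [List.cons_append, linesOf_cons d _ hd, linesOf_cons d x hd, ih]
      cases hl : linesOf x with
      | nil => exact absurd hl (linesOf_ne_nil x)
      | cons l0 ls =>
        cases ls with
        | nil => rfl
        | cons l1 ls2 =>
          rw [lastMod_cons (fun l => l ++ [c]) l0 (l1 :: ls2) (by simp)]
          show cons1 d (l0 :: lastMod (fun l => l ++ [c]) (l1 :: ls2)) =
            lastMod (fun l => l ++ [c]) ((d :: l0) :: l1 :: ls2)
          rw [lastMod_cons (fun l => l ++ [c]) (d :: l0) (l1 :: ls2) (by simp)]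
          rfl

theorem mapstrip_lastMod (c : Char) (L : List (List Char)) (h : PySem.Chars.isspace c = true) :
    (lastMod (fun l => l ++ [c]) L).map PySem.Chars.strip = L.map PySem.Chars.strip := by
  induction L with
  | nil => rfl
  | cons l t ih =>
    cases t with
    | nil => simp [lastMod, strip_snoc_space c l h]
    | cons z t2 =>
      rw [lastMod_cons _ _ _ (by simp)]
      simp only [List.map_cons]
      rw [ih]
      simp

theorem para_lastMod_space (c : Char) (L : List (List Char)) (h : PySem.Chars.isspace c = true) :
    para (lastMod (fun l => l ++ [c]) L) = para L := by
  unfold para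
  rw [mapstrip_lastMod c L h]

theorem lstrip_cons_space (c : Char) (l : List Char) (h : PySem.Chars.isspace c = true) :
    PySem.Chars.lstrip (c :: l) = PySem.Chars.lstrip l := by
  simp [PySem.Chars.lstrip, h]

theorem lstrip_cons_nospace (c : Char) (l : List Char) (h : PySem.Chars.isspace c = false) :
    PySem.Chars.lstrip (c :: l) = c :: l := by
  simp [PySem.Chars.lstrip, h]

theorem para_cons1_space (c : Char) (L : List (List Char)) (hs : PySem.Chars.isspace c = true)
    (hne : L ≠ []) : para (cons1 c L) = para L := by
  cases L with
  | nil => simp_all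
  | cons l0 ls =>
    unfold para cons1
    simp only [List.map_cons]
    rw [strip_cons_space c l0 hs]

theorem para_lines_lstrip (b : List Char) :
    para (linesOf (PySem.Chars.lstrip b)) = para (linesOf b) := by
  induction b with
  | nil => rfl
  | cons c b ih =>
    by_cases hs : PySem.Chars.isspace c = true
    · rw [lstrip_cons_space c b hs] at *
      rw [ih]
      by_cases hc : c = '\n'
      · subst hc
        rw [show linesOf ('\n' :: b) = [] :: linesOf b from rfl, para_cons_nil]
      · rw [linesOf_cons c b hc, para_cons1_space c _ hs (linesOf_ne_nil b)]
    · rw [lstrip_cons_nospace c b (by simpa using hs)]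

theorem para_lines_rstrip (b : List Char) :
    para (linesOf (PySem.Chars.rstrip b)) = para (linesOf b) := by
  induction b using List.reverseRecOn with
  | nil => rfl
  | append_singleton x c ih =>
    by_cases hs : PySem.Chars.isspace c = true
    · rw [rstrip_snoc_space c x hs, ih]
      by_cases hc : c = '\n'
      · subst hc
        rw [show x ++ ['\n'] = x ++ '\n' :: [] from rfl, linesOf_append_nl]
        rw [show linesOf ([] : List Char) = [[]] from rfl, para_append_nil]
      · rw [linesOf_snoc_char c x hc, para_lastMod_space c _ hs]
    · rw [rstrip_snoc_nospace c x (by simpa using hs)]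

theorem para_lines_strip (b : List Char) :
    para (linesOf (PySem.Chars.strip b)) = para (linesOf b) := by
  rw [PySem.Chars.strip, para_lines_rstrip, para_lines_lstrip]

theorem groupsOf_append (P L : List (List Char)) (h : ∀ l ∈ P, l ≠ []) :
    groupsOf (P ++ L) = withHeadG P (groupsOf L) := by
  induction P with
  | nil => simp [withHeadG_nil _ (groupsOf_ne_nil L)]
  | cons p t ih =>
    have hp : p ≠ [] := h p (by simp)
    rw [List.cons_append, groupsOf, if_neg hp, ih (fun l hl => h l (by simp [hl]))]
    rw [withHeadG_withHeadG]; rfl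

theorem withHead_cons1 (x : List Char) (c : Char) (B : List (List Char)) :
    withHead x (cons1 c B) = withHead (x ++ [c]) B := by
  cases B with
  | nil => simp [withHead, cons1]
  | cons b t => simp [withHead, cons1]

theorem FA_cons (b : List Char) (bs : List (List Char)) :
    FA (b :: bs) = if para (linesOf b) = [] then FA bs else para (linesOf b) :: FA bs := by
  simp only [FA, List.map_cons, List.filter_cons]
  split_ifs with h1 h2 h2 <;> simp_all

theorem FB_cons (g : List (List Char)) (gs : List (List (List Char))) :
    FB (g :: gs) = if para g = [] then FB gs else para g :: FB gs := by
  simp only [FB, List.map_cons, List.filter_cons]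
  split_ifs with h1 h2 h2 <;> simp_all

theorem FB_cons_nilgroup (gs : List (List (List Char))) : FB ([] :: gs) = FB gs := by
  rw [FB_cons, if_pos para_nil]

theorem FA_cons1_nl (B : List (List Char)) (h : B ≠ []) : FA (cons1 '\n' B) = FA B := by
  cases B with
  | nil => simp_all
  | cons b0 bs =>
    show FA (('\n' :: b0) :: bs) = FA (b0 :: bs)
    rw [FA_cons, FA_cons]
    rw [show linesOf ('\n' :: b0) = [] :: linesOf b0 from rfl, para_cons_nil]

def cons1_ne_nil (c : Char) (B : List (List Char)) : cons1 c B ≠ [] := by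
  cases B with | nil => simp [cons1] | cons b t => simp [cons1]

-- the grand induction: with current paragraph lines P and partial line pre,
-- A's per-block paragraphs equal B's per-group paragraphs
theorem grand : ∀ (n : Nat) (t : List Char) (P : List (List Char)) (pre : List Char),
    t.length ≤ n → (∀ l ∈ P, '\n' ∉ l ∧ l ≠ []) → '\n' ∉ pre → (pre = [] → P = []) →
    FA (withHead (ical (P ++ [pre])) (blocksOf t)) =
      FB (groupsOf (P ++ withHead pre (linesOf t))) := by
  intro n
  induction n using Nat.strong_induction_on with
  | _ n ih =>
  intro t P pre hlen hP hpre hpc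
  have hQnl : ∀ l ∈ P ++ [pre], '\n' ∉ l := by
    intro l hl
    rcases List.mem_append.mp hl with h | h
    · exact (hP l h).1
    · simp at h; subst h; exact hpre
  have hlic : linesOf (ical (P ++ [pre])) = P ++ [pre] := linesOf_ical _ (by simp) hQnl
  cases t with
  | nil =>
    -- base: a single final block / a single final group
    rw [show blocksOf [] = [[]] from rfl]
    rw [show withHead (ical (P ++ [pre])) [[]] = [ical (P ++ [pre]) ++ []] from rfl]
    rw [List.append_nil]
    rw [show linesOf [] = [[]] from rfl]
    rw [show withHead pre [[]] = [pre ++ []] from rfl, List.append_nil]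
    by_cases hpre0 : pre = []
    · have hP0 := hpc hpre0; subst hpre0; subst hP0
      decide
    · have hQ : ∀ l ∈ P ++ [pre], l ≠ [] := by
        intro l hl
        rcases List.mem_append.mp hl with h | h
        · exact (hP l h).2
        · simp at h; subst h; exact hpre0
      rw [show (P ++ [pre] : List (List Char)) = (P ++ [pre]) ++ [] by simp]
      rw [groupsOf_append _ [] hQ]
      rw [show groupsOf ([] : List (List Char)) = [[]] from rfl]
      rw [show withHeadG (P ++ [pre]) [[]] = [(P ++ [pre]) ++ []] from rfl, List.append_nil]
      rw [FA_cons, FB_cons, hlic]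
      by_cases hq : para (P ++ [pre]) = [] <;> simp [hq, FA, FB]
  | cons c r =>
    by_cases hc : c = '\n'
    · subst hc
      cases r with
      | nil =>
        -- t = ['\n'] : a trailing newline
        rw [blocksOf_nl_single]
        rw [show withHead (ical (P ++ [pre])) [['\n']] = [ical (P ++ [pre]) ++ ['\n']] from rfl]
        rw [show linesOf ['\n'] = [[], ([] : List Char)] from rfl]
        rw [show withHead pre [[], ([] : List Char)] = [pre ++ [], ([] : List Char)] from rfl,
          List.append_nil]
        by_cases hpre0 : pre = []
        · have hP0 := hpc hpre0; subst hpre0; subst hP0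
          decide
        · have hQ : ∀ l ∈ P ++ [pre], l ≠ [] := by
            intro l hl
            rcases List.mem_append.mp hl with h | h
            · exact (hP l h).2
            · simp at h; subst h; exact hpre0
          rw [show (P ++ [pre, ([] : List Char)] : List (List Char)) = (P ++ [pre]) ++ [[]] by simp]
          rw [groupsOf_append _ [[]] hQ]
          rw [show groupsOf [([] : List Char)] = [[], ([] : List (List Char))] by
            rw [groupsOf, if_pos rfl]; rfl]
          rw [show withHeadG (P ++ [pre]) [[], ([] : List (List Char))] =
            ((P ++ [pre]) ++ []) :: [([] : List (List Char))] from rfl, List.append_nil]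
          rw [FA_cons, FB_cons, FB_cons]
          rw [show (['\n'] : List Char) = '\n' :: [] from rfl, linesOf_append_nl, hlic]
          rw [show linesOf ([] : List Char) = [[]] from rfl, para_append_nil, para_nil, if_pos rfl]
          by_cases hq : para (P ++ [pre]) = [] <;> simp [hq, FA, FB]
      | cons d r2 =>
        by_cases hd : d = '\n'
        · subst hd
          -- t = '\n' :: '\n' :: r2 : paragraph boundary
          have htail : FA (blocksOf r2) = FB (groupsOf (linesOf r2)) := by
            have h := ih r2.length (by simp at hlen; omega) r2 [] [] (le_refl _) (by simp)
              (by simp) (by simp)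
            simp only [List.nil_append] at h
            rw [show ical [([] : List Char)] = [] from rfl] at h
            rw [withHead_nil _ (blocksOf_ne_nil r2),
              withHead_nil _ (linesOf_ne_nil r2)] at h
            exact h
          rw [blocksOf_nn]
          rw [show withHead (ical (P ++ [pre])) ([] :: blocksOf r2) =
              (ical (P ++ [pre]) ++ []) :: blocksOf r2 from rfl, List.append_nil]
          rw [show linesOf ('\n' :: '\n' :: r2) = [] :: [] :: linesOf r2 from rfl]
          rw [show withHead pre ([] :: [] :: linesOf r2) = (pre ++ []) :: [] :: linesOf r2 from rfl,
            List.append_nil]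
          by_cases hpre0 : pre = []
          · have hP0 := hpc hpre0; subst hpre0; subst hP0
            simp only [List.nil_append]
            rw [show groupsOf ([] :: [] :: linesOf r2) = [] :: [] :: groupsOf (linesOf r2) by
              rw [groupsOf, if_pos rfl, groupsOf, if_pos rfl]]
            rw [FB_cons_nilgroup, FB_cons_nilgroup, ← htail, FA_cons]
            rw [show ical [([] : List Char)] = [] from rfl]
            rw [show linesOf ([] : List Char) = [[]] from rfl]
            rw [show para [([] : List Char)] = [] from rfl, if_pos rfl]
          · have hQ : ∀ l ∈ P ++ [pre], l ≠ [] := by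
              intro l hl
              rcases List.mem_append.mp hl with h | h
              · exact (hP l h).2
              · simp at h; subst h; exact hpre0
            rw [show (P ++ pre :: [] :: linesOf r2 : List (List Char)) =
              (P ++ [pre]) ++ ([] :: linesOf r2) by simp]
            rw [groupsOf_append _ _ hQ]
            rw [show groupsOf ([] :: linesOf r2) = [] :: groupsOf (linesOf r2) by
              rw [groupsOf, if_pos rfl]]
            rw [show withHeadG (P ++ [pre]) ([] :: groupsOf (linesOf r2)) =
              ((P ++ [pre]) ++ []) :: groupsOf (linesOf r2) from rfl, List.append_nil]
            rw [FA_cons, FB_cons, hlic, ← htail]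
        · -- t = '\n' :: d :: r2 with d ≠ '\n' : a line wrap inside a paragraph
          rw [blocksOf_nl_cons d r2 hd, blocksOf_cons d r2 hd]
          rw [show linesOf ('\n' :: d :: r2) = [] :: linesOf (d :: r2) from rfl,
            linesOf_cons d r2 hd]
          by_cases hpre0 : pre = []
          · have hP0 := hpc hpre0; subst hpre0; subst hP0
            have h := ih r2.length (by simp at hlen; omega) r2 [] [d] (le_refl _) (by simp)
              (by simp; exact fun h => hd h.symm) (by simp)
            simp only [List.nil_append] at h
            rw [show ical [[d]] = [d] from rfl] at h
            simp only [List.nil_append]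
            rw [show ical [([] : List Char)] = [] from rfl]
            rw [withHead_nil _ (cons1_ne_nil _ _), FA_cons1_nl _ (cons1_ne_nil _ _)]
            rw [show withHead [] ([] :: cons1 d (linesOf r2)) =
              ([] ++ []) :: cons1 d (linesOf r2) from rfl, List.nil_append]
            rw [show groupsOf ([] :: cons1 d (linesOf r2)) = [] :: groupsOf (cons1 d (linesOf r2)) by
              rw [groupsOf, if_pos rfl]]
            rw [FB_cons_nilgroup]
            rw [cons1_eq_withHead, h, cons1_eq_withHead]
          · have h := ih r2.length (by simp at hlen; omega) r2 (P ++ [pre]) [d] (le_refl _)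
              (by intro l hl
                  rcases List.mem_append.mp hl with h | h
                  · exact hP l h
                  · simp at h; subst h; exact ⟨hpre, hpre0⟩)
              (by simp; exact fun h => hd h.symm) (by simp)
            rw [ical_snoc (P ++ [pre]) [d] (by simp)] at h
            rw [withHead_cons1, withHead_cons1]
            rw [show ical (P ++ [pre]) ++ ['\n'] ++ [d] = ical (P ++ [pre]) ++ '\n' :: [d] by simp]
            rw [show withHead pre ([] :: cons1 d (linesOf r2)) =
              (pre ++ []) :: cons1 d (linesOf r2) from rfl, List.append_nil]
            rw [show (P ++ pre :: cons1 d (linesOf r2) : List (List Char)) =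
              (P ++ [pre]) ++ cons1 d (linesOf r2) by simp]
            rw [cons1_eq_withHead] at *
            exact h
    · -- t = c :: r with c ≠ '\n' : extend the current line
      rw [blocksOf_cons c r hc, linesOf_cons c r hc]
      rw [withHead_cons1, withHead_cons1, ical_snoc_char]
      exact ih r.length (by simp at hlen; omega) r P (pre ++ [c]) (le_refl _) hP
        (by simp [hpre]; exact fun h => hc h.symm) (by simp)

theorem chars_main (t : List Char) : FA (blocksOf t) = FB (groupsOf (linesOf t)) := by
  have h := grand t.length t [] [] (le_refl _) (by simp) (by simp) (by simp)
  simpa [ical, withHead_nil _ (blocksOf_ne_nil t), withHead_nil _ (linesOf_ne_nil t)] using h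

theorem merge_eq (L : List (List Char)) :
    PySem.Chars.join [' '] ((L.filter (fun line => PySem.Chars.strip line ≠ [])).map PySem.Chars.strip) = para L := by
  unfold para
  rw [List.filter_map]
  rfl

theorem foldA_gen (bs : List (List Char)) (acc : List (List Char)) :
    bs.foldl (fun acc block =>
      let b := PySem.Chars.strip block
      if b = [] then acc
      else
        let lines := PySem.Chars.splitOn b ['\n']
        let merged := PySem.Chars.join [' ']
          ((lines.filter (fun line => PySem.Chars.strip line ≠ [])).map PySem.Chars.strip)
        if merged = [] then acc else acc ++ [merged]) acc
    = acc ++ (bs.map (fun b => para (linesOf (PySem.Chars.strip b)))).filter (fun s => s ≠ []) := by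
  induction bs generalizing acc with
  | nil => simp
  | cons b bs ih =>
    rw [List.foldl_cons, ih]
    simp only []
    by_cases hb : PySem.Chars.strip b = []
    · rw [if_pos hb, List.map_cons, hb]
      rw [show para (linesOf ([] : List Char)) = [] from rfl]
      simp
    · rw [if_neg hb, splitOn_eq_linesOf, merge_eq]
      by_cases hm : para (linesOf (PySem.Chars.strip b)) = []
      · rw [if_pos hm, List.map_cons, hm]
        simp
      · rw [if_neg hm, List.map_cons, List.filter_cons_of_pos (by simpa using hm)]
        simp

-- A's fold equals FA ∘ blocksOf
theorem foldA (t : List Char) :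
    collapse_newlines_py (String.ofList t) = String.ofList (PySem.Chars.join ['\n', '\n'] (FA (blocksOf t))) := by
  unfold collapse_newlines_py
  simp only [String.toList_ofList]
  rw [splitOn_eq_blocksOf, foldA_gen]
  unfold FA
  rw [List.nil_append, List.map_congr_left (fun b (_ : b ∈ blocksOf t) => para_lines_strip b)]

def stepB (st : List (List Char) × List (List Char)) (line : List Char) :
    List (List Char) × List (List Char) :=
  if line = [] then
    let merged := pvMergeAlt st.1
    ([], if merged = [] then st.2 else st.2 ++ [merged])
  else (st.1 ++ [line], st.2)

def flushB (st : List (List Char) × List (List Char)) : List (List Char) :=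
  if pvMergeAlt st.1 = [] then st.2 else st.2 ++ [pvMergeAlt st.1]

theorem flushB_eq (cur res : List (List Char)) :
    flushB (cur, res) = if para cur = [] then res else res ++ [para cur] := rfl

theorem foldB_gen (L : List (List Char)) : ∀ (cur res : List (List Char)),
    flushB (L.foldl stepB (cur, res)) = res ++ FB (withHeadG cur (groupsOf L)) := by
  induction L with
  | nil =>
    intro cur res
    rw [List.foldl_nil, flushB_eq]
    rw [show groupsOf [] = [[]] from rfl]
    rw [show withHeadG cur [[]] = [cur ++ []] from rfl]
    by_cases hm : para cur = []
    · rw [if_pos hm]; simp [FB, hm]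
    · rw [if_neg hm]; simp [FB, hm]
  | cons l L ih =>
    intro cur res
    rw [List.foldl_cons]
    by_cases hl : l = []
    · subst hl
      rw [show stepB (cur, res) [] = ([], flushB (cur, res)) from rfl]
      rw [ih [] (flushB (cur, res))]
      rw [withHeadG_nil _ (groupsOf_ne_nil L)]
      rw [show groupsOf ([] :: L) = [] :: groupsOf L by rw [groupsOf, if_pos rfl]]
      rw [show withHeadG cur ([] :: groupsOf L) = (cur ++ []) :: groupsOf L from rfl]
      rw [flushB_eq]
      simp only [List.append_nil, FB, List.map_cons]
      by_cases hm : para cur = []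
      · rw [if_pos hm, hm, List.filter_cons_of_neg (by simp)]
      · rw [if_neg hm, List.filter_cons_of_pos (by simpa using hm)]
        simp
    · rw [show stepB (cur, res) l = (cur ++ [l], res) by simp [stepB, hl]]
      rw [ih (cur ++ [l]) res]
      rw [show groupsOf (l :: L) = withHeadG [l] (groupsOf L) by rw [groupsOf, if_neg hl]]
      rw [withHeadG_withHeadG]

-- B's fold equals FB ∘ groupsOf ∘ linesOf
theorem foldB (t : List Char) :
    collapse_newlines_py_alt (String.ofList t) = String.ofList (PySem.Chars.join ['\n', '\n'] (FB (groupsOf (linesOf t)))) := by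
  unfold collapse_newlines_py_alt
  simp only [String.toList_ofList]
  rw [splitOn_eq_linesOf]
  rw [show ((linesOf t).foldl (fun (st : List (List Char) × List (List Char)) (line : List Char) =>
      if line = [] then
        let merged := pvMergeAlt st.1
        ([], if merged = [] then st.2 else st.2 ++ [merged])
      else (st.1 ++ [line], st.2)) ([], [])) = (linesOf t).foldl stepB ([], []) from rfl]
  rw [show (if pvMergeAlt ((linesOf t).foldl stepB ([], [])).1 = []
        then ((linesOf t).foldl stepB ([], [])).2
        else ((linesOf t).foldl stepB ([], [])).2 ++ [pvMergeAlt ((linesOf t).foldl stepB ([], [])).1])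
      = flushB ((linesOf t).foldl stepB ([], [])) from rfl]
  rw [foldB_gen (linesOf t) [] []]
  rw [withHeadG_nil _ (groupsOf_ne_nil (linesOf t)), List.nil_append]

-- ===== VERDICT (by name: the statement is the Claim_ definition above) =====
theorem collapse_newlines_py_spec : Claim_equal_collapse_newlines_py := by
  intro text _
  unfold Spec_collapse_newlines_py
  have h1 := foldA text.toList
  have h2 := foldB text.toList
  have hmk : String.ofList text.toList = text := by
    simp
  rw [hmk] at h1 h2
  rw [h1, h2, chars_main]
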